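-- pv_equiv track=rewrite | github.com/colinpearse/advent-of-code-2019 | aofc2019.q04.py | validpw_b
-- ===== SOURCE A (Python) =====
-- def hasdouble(numarr):
--     return (set(numarr) & set({2}) == set({2}))
--
-- def validpw_b(num):
--     numarr = list(map(int, list(str(num))))
--     numdig = len(numarr)
--     if numdig == 6:
--         lastdig = 0
--         doubdig = {0:1, 1:1, 2:1, 3:1, 4:1, 5:1, 6:1, 7:1, 8:1, 9:1}
--         for dig in numarr:
--             if dig == lastdig:
--                 doubdig[dig] += 1
--             elif dig > lastdig:
--                 lastdig = dig
--             else: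
--                 return False
--         return hasdouble(doubdig.values())
--     return False
-- ===== SOURCE B (Python) =====
-- def validpw_b(num):
--     digits = [int(c) for c in str(num)]
--     if len(digits) != 6:
--         return False
--     if digits != sorted(digits):
--         return False
--     return any(digits.count(d) == 2 for d in set(digits))
-- ===== Notes on version B (the rewrite author's own statement) =====
-- stated objective: idiomatic
-- what changed: Replaces A's fused single loop (last-digit tracking with a 10-entry count dict and a set-intersection test) by separate passes: a sortedness comparison digits == sorted(digits) and a per-digit occurrence count any(digits.count(d) == 2 for d in set(digits)).
import Mathlib
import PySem

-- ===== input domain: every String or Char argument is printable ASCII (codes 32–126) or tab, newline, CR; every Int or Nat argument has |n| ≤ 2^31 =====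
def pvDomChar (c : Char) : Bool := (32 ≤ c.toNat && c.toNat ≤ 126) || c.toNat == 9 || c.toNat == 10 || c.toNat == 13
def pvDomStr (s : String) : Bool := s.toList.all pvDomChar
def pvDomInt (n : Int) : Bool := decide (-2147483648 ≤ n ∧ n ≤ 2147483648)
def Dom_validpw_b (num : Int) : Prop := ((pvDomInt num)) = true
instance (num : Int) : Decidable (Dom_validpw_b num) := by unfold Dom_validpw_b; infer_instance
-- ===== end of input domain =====

-- B replaces A's fused loop (last-digit tracking + count dict + set test) by a sortedness
-- comparison plus per-digit occurrence counting (idiomatic decomposition, same cost class).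


-- int(c) for a single digit character; exact there (Pre_ keeps num ≥ 0, so str(num) is all digits)
def pyDigitInt (c : Char) : Int := (c.toNat : Int) - 48

-- ===== PORT A =====
def hasdouble (numarr : List Int) : Bool :=
  PySem.Set.equal (PySem.Set.inter (PySem.Set.ofList numarr) (PySem.Set.ofList [2])) (PySem.Set.ofList [2])

def validpwInit : PySem.Dict Int Int :=
  PySem.Dict.ofList [(0,1),(1,1),(2,1),(3,1),(4,1),(5,1),(6,1),(7,1),(8,1),(9,1)]

-- doubdig[dig] += 1 is modify; the key is always present (digits 0..9), where modify is exact
def validpwLoop : List Int → Int → PySem.Dict Int Int → Option (PySem.Dict Int Int)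
  | [], _, doubdig => some doubdig
  | dig :: rest, lastdig, doubdig =>
    if dig = lastdig then validpwLoop rest lastdig (doubdig.modify dig 0 (· + 1))
    else if lastdig < dig then validpwLoop rest dig doubdig
    else none

def validpw_b (num : Int) : Bool :=
  let numarr := (PySem.Int.toStr num).toList.map pyDigitInt
  let numdig := numarr.length
  if numdig = 6 then
    match validpwLoop numarr 0 validpwInit with
    | some doubdig => hasdouble doubdig.values
    | none => false
  else false

-- ===== PORT B =====
def validpw_b_alt (num : Int) : Bool :=
  let digits := (PySem.Int.toStr num).toList.map pyDigitInt
  if digits.length ≠ 6 then false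
  else if digits ≠ PySem.List.sorted digits (fun x => x) false then false
  else (PySem.Set.ofList digits).any (fun d => digits.count d == 2)

-- ===== PRECONDITION & SPEC =====
-- Pre_ excludes num < 0: there str(num) starts with '-' and A raises ValueError in map(int, ...).
def Pre_validpw_b (num : Int) : Prop := 0 ≤ num
instance (num : Int) : Decidable (Pre_validpw_b num) := by unfold Pre_validpw_b; infer_instance
def pvWitness_validpw_b : Int := (122345)

def Spec_validpw_b (num : Int) (out : Bool) : Prop := out = validpw_b_alt num
instance (num : Int) (out : Bool) : Decidable (Spec_validpw_b num out) := by unfold Spec_validpw_b; infer_instance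

-- ===== CLAIM (what is proved, stated in full; the proofs are below) =====
def Claim_equal_validpw_b : Prop := ∀ (num : Int), Dom_validpw_b num → Pre_validpw_b num → Spec_validpw_b num (validpw_b num)

-- ===== LEMMAS AND PROOFS =====

lemma chain_le_of_mem {last : Int} {l : List Int} (h : List.IsChain (· ≤ ·) (last :: l)) :
    ∀ y ∈ l, last ≤ y := by
  rw [List.isChain_iff_pairwise] at h
  exact (List.pairwise_cons.mp h).1

-- the digits on which A's loop executes doubdig[dig] += 1
def incs : Int → List Int → List Int
  | _, [] => []
  | last, x :: xs => (if x = last then [x] else []) ++ incs x xs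

lemma loop_none (l : List Int) : ∀ (last : Int) (d : PySem.Dict Int Int),
    ¬ List.IsChain (· ≤ ·) (last :: l) → validpwLoop l last d = none := by
  induction l with
  | nil => intro last d h; simp at h
  | cons x xs ih =>
    intro last d h
    rw [List.isChain_cons_cons] at h
    by_cases hx : last ≤ x
    · have hc : ¬ List.IsChain (· ≤ ·) (x :: xs) := fun hc => h ⟨hx, hc⟩
      by_cases hxe : x = last
      · simp only [validpwLoop, if_pos hxe]; exact ih _ _ (by rw [← hxe]; exact hc)
      · have hlt : last < x := lt_of_le_of_ne hx (fun e => hxe e.symm)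
        simp only [validpwLoop, if_neg hxe, if_pos hlt]; exact ih _ _ hc
    · have hxe : ¬ x = last := fun e => hx (le_of_eq e.symm)
      have hlt : ¬ last < x := fun e => hx (le_of_lt e)
      simp [validpwLoop, hxe, hlt]

lemma loop_some (l : List Int) : ∀ (last : Int) (d : PySem.Dict Int Int),
    List.IsChain (· ≤ ·) (last :: l) →
    validpwLoop l last d =
      some ((incs last l).foldl (fun d x => d.modify x 0 (· + 1)) d) := by
  induction l with
  | nil => intro last d _; simp [validpwLoop, incs]
  | cons x xs ih =>
    intro last d h
    rw [List.isChain_cons_cons] at h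
    obtain ⟨hx, hc⟩ := h
    by_cases hxe : x = last
    · subst hxe
      simp only [validpwLoop, incs, reduceIte]
      rw [ih _ _ hc]; simp
    · have hlt : last < x := lt_of_le_of_ne hx (fun e => hxe e.symm)
      simp only [validpwLoop, if_pos hlt, incs, if_neg hxe]
      rw [ih _ _ hc]; simp

lemma incs_subset {l : List Int} : ∀ {last : Int} {y : Int}, y ∈ incs last l → y ∈ l := by
  induction l with
  | nil => intro last y h; simp [incs] at h
  | cons x xs ih =>
    intro last y h
    simp only [incs, List.mem_append] at h
    rcases h with h | h
    · split at h <;> simp_all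
    · exact List.mem_cons_of_mem _ (ih h)

lemma incs_count (l : List Int) : ∀ (last k : Int), List.IsChain (· ≤ ·) (last :: l) →
    (incs last l).count k = if k = last then l.count k else l.count k - 1 := by
  induction l with
  | nil => intro last k _; simp [incs]
  | cons x xs ih =>
    intro last k h
    rw [List.isChain_cons_cons] at h
    obtain ⟨hx, hc⟩ := h
    have ihx := ih x k hc
    simp only [incs, List.count_append, List.count_cons]
    by_cases hxe : x = last
    · subst hxe
      by_cases hk : k = x
      · subst hk; simp [ihx]; omega
      · simp [hk, ihx, Ne.symm hk]
    · have hlt : last < x := lt_of_le_of_ne hx (fun e => hxe e.symm)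
      by_cases hk : k = last
      · subst hk
        have hnot : k ∉ xs := fun hm => absurd (chain_le_of_mem hc _ hm) (by omega)
        have h0 : xs.count k = 0 := List.count_eq_zero.mpr hnot
        simp [hxe, ihx, h0, Ne.symm hxe]
      · by_cases hkx : k = x
        · subst hkx; simp [hxe, ihx]
        · simp [hxe, ihx, hk, hkx, Ne.symm hkx]

lemma hasdouble_iff (vals : List Int) : hasdouble vals = true ↔ (2 : Int) ∈ vals := by
  unfold hasdouble
  rw [PySem.Set.equal_iff]
  constructor
  · intro h
    have h2 := (h 2).mpr ((PySem.Set.mem_ofList _ _).mpr (List.mem_singleton.mpr rfl))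
    exact (PySem.Set.mem_ofList _ _).mp ((PySem.Set.mem_inter _ _ _).mp h2).1
  · intro h x
    rw [PySem.Set.mem_inter, PySem.Set.mem_ofList, PySem.Set.mem_ofList, List.mem_singleton]
    constructor
    · exact fun hx => hx.2
    · intro hx; exact ⟨by rw [hx]; exact h, hx⟩

lemma mem_digit_keys {y : Int} (h0 : 0 ≤ y) (h9 : y ≤ 9) :
    y ∈ ([0,1,2,3,4,5,6,7,8,9] : List Int) := by
  simp only [List.mem_cons, List.not_mem_nil, or_false]
  omega

-- the combinatorial core: A's post-length-check value equals B's, for digit lists with nonzero head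
lemma main_lemma (l : List Int) (h09 : ∀ d ∈ l, 0 ≤ d ∧ d ≤ 9)
    (hhd : ∀ x, l.head? = some x → 1 ≤ x) :
    (match validpwLoop l 0 validpwInit with
      | some doubdig => hasdouble doubdig.values
      | none => false)
    = (if l ≠ PySem.List.sorted l (fun x => x) false then false
       else (PySem.Set.ofList l).any (fun d => l.count d == 2)) := by
  by_cases hch : List.IsChain (· ≤ ·) ((0:Int) :: l)
  · have hpw : List.Pairwise (· ≤ ·) l :=
      (List.pairwise_cons.mp (List.isChain_iff_pairwise.mp hch)).2
    have hsort : PySem.List.sorted l (fun x => x) false = l :=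
      PySem.List.sorted_eq_self_of_pairwise l _ hpw
    rw [loop_some l 0 validpwInit hch, if_neg (fun hne => hne hsort.symm)]
    have h1 : ∀ d ∈ l, 1 ≤ d := by
      cases l with
      | nil => simp
      | cons x xs =>
        intro d hd
        have hx1 : 1 ≤ x := hhd x rfl
        rcases List.mem_cons.mp hd with rfl | hd
        · exact hx1
        · exact le_trans hx1 ((List.pairwise_cons.mp hpw).1 d hd)
    have h0notmem : (0 : Int) ∉ l := fun hm => absurd (h1 0 hm) (by omega)
    have h0count : l.count (0 : Int) = 0 := List.count_eq_zero.mpr h0notmem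
    have hkeys : ((incs 0 l).foldl (fun d x => d.modify x 0 (· + 1)) validpwInit).keys
        = validpwInit.keys := by
      rw [PySem.Dict.keys_foldl_modify, PySem.Set.update_eq_append_filter]
      have hfil : List.filter (fun y => !(PySem.Set.contains validpwInit.keys y))
          (PySem.Set.ofList (incs 0 l)) = [] := by
        rw [List.filter_eq_nil_iff]
        intro y hy
        have hyl : y ∈ l := incs_subset ((PySem.Set.mem_ofList _ _).mp hy)
        obtain ⟨hy0, hy9⟩ := h09 y hyl
        have hk10 : validpwInit.keys = ([0,1,2,3,4,5,6,7,8,9] : List Int) := by decide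
        have hmem : y ∈ validpwInit.keys := hk10 ▸ mem_digit_keys hy0 hy9
        simpa using hmem
      rw [hfil, List.append_nil]
    have hnodup : ((incs 0 l).foldl (fun d x => d.modify x 0 (· + 1)) validpwInit).keys.Nodup := by
      rw [hkeys]; decide
    rw [Bool.eq_iff_iff, hasdouble_iff,
        PySem.Dict.values_eq_map_keys _ hnodup 0, hkeys, List.any_eq_true]
    have hgetD : ∀ k : Int,
        ((incs 0 l).foldl (fun d x => d.modify x 0 (· + 1)) validpwInit).getD k 0
          = validpwInit.getD k 0 + ((incs 0 l).count k : Int) :=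
      fun k => PySem.Dict.getD_foldl_modify_add_one (incs 0 l) validpwInit k
    constructor
    · rintro hmem
      obtain ⟨k, hkmem, hk2⟩ := List.mem_map.mp hmem
      have hk10 : validpwInit.keys = ([0,1,2,3,4,5,6,7,8,9] : List Int) := by decide
      rw [hk10] at hkmem
      have hkinit : validpwInit.getD k 0 = 1 := by
        fin_cases hkmem <;> decide
      rw [hgetD k, hkinit] at hk2
      have hcnt : (incs 0 l).count k = 1 := by omega
      rw [incs_count l 0 k hch] at hcnt
      by_cases hk0 : k = 0
      · rw [if_pos hk0, hk0, h0count] at hcnt; omega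
      · rw [if_neg hk0] at hcnt
        have hc2 : l.count k = 2 := by
          have hpos : 0 < l.count k := by omega
          omega
        refine ⟨k, ?_, by simp [hc2]⟩
        exact (PySem.Set.mem_ofList _ _).mpr (List.count_pos_iff.mp (by omega))
    · rintro ⟨d, hdmem, hd2⟩
      have hdl : d ∈ l := (PySem.Set.mem_ofList _ _).mp hdmem
      have hc2 : l.count d = 2 := by simpa using hd2
      have hd1 : 1 ≤ d := h1 d hdl
      have hd9 : d ≤ 9 := (h09 d hdl).2
      have hk10 : validpwInit.keys = ([0,1,2,3,4,5,6,7,8,9] : List Int) := by decide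
      refine List.mem_map.mpr ⟨d, ?_, ?_⟩
      · rw [hk10]; exact mem_digit_keys (by omega) hd9
      · have hdinit : validpwInit.getD d 0 = 1 := by
          have hmem : d ∈ ([0,1,2,3,4,5,6,7,8,9] : List Int) := mem_digit_keys (by omega) hd9
          fin_cases hmem <;> decide
        rw [hgetD d, hdinit, incs_count l 0 d hch, if_neg (by omega : ¬ d = 0), hc2]
        norm_num
  · have hnsort : l ≠ PySem.List.sorted l (fun x => x) false := by
      intro he
      apply hch
      rw [List.isChain_iff_pairwise, List.pairwise_cons]
      refine ⟨fun y hy => (h09 y hy).1, ?_⟩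
      have hp := PySem.List.sorted_pairwise l (fun x => x)
      rw [← he] at hp
      exact hp
    rw [loop_none l 0 validpwInit hch, if_pos hnsort]

-- digits of str(num) for num ≥ 0 are digit characters
lemma toStr_chars_digits {num : Int} (h : 0 ≤ num) :
    ∀ c ∈ (PySem.Int.toStr num).toList, 48 ≤ c.toNat ∧ c.toNat ≤ 57 := by
  intro c hc
  rw [PySem.Int.toList_toStr] at hc
  unfold PySem.Int.toChars at hc
  rw [if_neg (by omega : ¬ num < 0)] at hc
  have hd := Nat.isDigit_of_mem_toDigits (b := 10) (by norm_num) (le_refl 10) hc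
  simp only [Char.isDigit, Bool.and_eq_true, decide_eq_true_eq] at hd
  obtain ⟨h1, h2⟩ := hd
  constructor
  · exact UInt32.le_iff_toNat_le.mp h1
  · exact UInt32.le_iff_toNat_le.mp h2

-- a positive number's decimal representation does not start with '0'
lemma toDigits_head_ne_zero : ∀ (n : Nat), 1 ≤ n → ∀ c, (Nat.toDigits 10 n).head? = some c → c ≠ '0' := by
  intro n
  induction n using Nat.strong_induction_on with
  | _ n ih =>
    intro h1 c hc
    by_cases hn : n < 10
    · rw [Nat.toDigits_of_lt_base hn] at hc
      simp only [List.head?_cons, Option.some.injEq] at hc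
      subst hc
      interval_cases n <;> decide
    · rw [Nat.toDigits_of_base_le (by norm_num) (by omega)] at hc
      have hne : Nat.toDigits 10 (n / 10) ≠ [] :=
        List.ne_nil_of_length_pos Nat.length_toDigits_pos
      rw [List.head?_append_of_ne_nil _ hne] at hc
      exact ih (n / 10) (by omega) (by omega) c hc

-- ===== VERDICT (by name: the statement is the Claim_ definition above) =====
theorem validpw_b_spec : Claim_equal_validpw_b := by
  intro num _ hpre
  unfold Pre_validpw_b at hpre
  unfold Spec_validpw_b validpw_b validpw_b_alt
  simp only []
  by_cases hlen : ((PySem.Int.toStr num).toList.map pyDigitInt).length = 6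
  · rw [if_pos hlen, if_neg (fun hne => hne hlen)]
    have hchars := toStr_chars_digits hpre
    have h09 : ∀ d ∈ (PySem.Int.toStr num).toList.map pyDigitInt, 0 ≤ d ∧ d ≤ 9 := by
      intro d hd
      obtain ⟨c, hc, rfl⟩ := List.mem_map.mp hd
      have := hchars c hc
      unfold pyDigitInt
      omega
    have hchars_eq : (PySem.Int.toStr num).toList = Nat.toDigits 10 num.toNat := by
      rw [PySem.Int.toList_toStr]
      unfold PySem.Int.toChars
      rw [if_neg (by omega : ¬ num < 0)]
    have hlc : (Nat.toDigits 10 num.toNat).length = 6 := by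
      rw [← hchars_eq]
      simpa [List.length_map] using hlen
    have hge : 1 ≤ num.toNat := by
      by_contra hlt
      have h0 : num.toNat = 0 := by omega
      rw [h0] at hlc
      simp [Nat.toDigits_zero] at hlc
    have hhd : ∀ x, ((PySem.Int.toStr num).toList.map pyDigitInt).head? = some x → 1 ≤ x := by
      intro x hx
      rw [List.head?_map] at hx
      obtain ⟨c, hc, rfl⟩ := Option.map_eq_some_iff.mp hx
      have hcm : c ∈ (PySem.Int.toStr num).toList := List.mem_of_mem_head? hc
      have hb := hchars c hcm
      have hcne : c ≠ '0' := toDigits_head_ne_zero num.toNat hge c (by rw [← hchars_eq]; exact hc)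
      have hne48 : c.toNat ≠ 48 := by
        intro h48
        apply hcne
        have : c.val.toNat = (48 : Nat) := h48
        have hv : c.val = ('0').val := by
          apply UInt32.toNat_inj.mp
          simpa using this
        exact Char.ext hv
      unfold pyDigitInt
      omega
    exact main_lemma _ h09 hhd
  · rw [if_neg hlen, if_pos hlen]
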